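-- pv_equiv track=rewrite | github.com/andreasaspe/Thesis_code | Other_scripts/Find_fractures_helping_functions.py | is_it_a_full_column
-- ===== SOURCE A (Python) =====
-- def is_it_a_full_column(array):
--     occurrences = 0
--     process_started = 0
--     len_of_chain = 0
--     for i in range(len(array)):
--         if array[i] == 1:
--
--             process_started = 1
--             len_of_chain+=1
--
--             if occurrences == 1: #Så betyder det, at den allerede har set den én gang.
--                 return False, 0
--         else:
--             if process_started == 1:
--                 occurrences=1
--             else:
--                 pass
--     return True, len_of_chain
-- ===== SOURCE B (Python) =====
-- def is_it_a_full_column(array):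
--     idxs = [i for i, x in enumerate(array) if x == 1]
--     if not idxs:
--         return True, 0
--     if idxs[-1] - idxs[0] + 1 == len(idxs):
--         return True, len(idxs)
--     return False, 0
-- ===== Notes on version B (the rewrite author's own statement) =====
-- stated objective: simpler
-- what changed: Replaced A's stateful flag-carrying scan (process_started/occurrences/early return) with collecting the indices of elements equal to 1 and checking that the span last-first+1 equals their count.
import Mathlib
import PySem

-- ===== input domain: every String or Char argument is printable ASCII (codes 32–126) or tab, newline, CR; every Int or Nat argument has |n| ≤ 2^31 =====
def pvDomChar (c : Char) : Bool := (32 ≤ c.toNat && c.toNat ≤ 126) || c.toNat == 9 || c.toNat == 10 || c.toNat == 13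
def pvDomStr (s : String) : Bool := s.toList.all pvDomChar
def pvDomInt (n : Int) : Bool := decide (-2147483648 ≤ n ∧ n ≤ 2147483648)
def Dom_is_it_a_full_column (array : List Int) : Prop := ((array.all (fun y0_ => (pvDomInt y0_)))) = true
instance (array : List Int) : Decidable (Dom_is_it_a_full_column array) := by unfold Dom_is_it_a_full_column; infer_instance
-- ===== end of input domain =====

-- B replaces A's stateful flag scan by a collect-the-indices-of-1s pass and a span-vs-count check (objective: simpler).

-- ===== PORT A =====
-- the for-loop of A as structural recursion over the remaining list, carrying the three Python ints
def pvGoA : List Int → Int → Int → Int → Bool × Int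
  | [], _occ, _ps, len => (true, len)
  | x :: xs, occ, _ps, len =>
    if x = 1 then
      if occ = 1 then (false, 0) else pvGoA xs occ 1 (len + 1)
    else
      if _ps = 1 then pvGoA xs 1 _ps len else pvGoA xs occ _ps len

def is_it_a_full_column (array : List Int) : Bool × Int :=
  pvGoA array 0 0 0

-- ===== PORT B =====
-- the comprehension [i for i, x in enumerate(array) if x == 1], carrying the running index
def pvOnesIdxFrom (i : Nat) : List Int → List Nat
  | [] => []
  | x :: xs => if x = 1 then i :: pvOnesIdxFrom (i + 1) xs else pvOnesIdxFrom (i + 1) xs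

def is_it_a_full_column_alt (array : List Int) : Bool × Int :=
  match pvOnesIdxFrom 0 array with
  | [] => (true, 0)
  | h :: t =>
    if t.getLastD h - h + 1 = (h :: t).length then (true, ((h :: t).length : Int))
    else (false, 0)

-- ===== PRECONDITION & SPEC =====
def Spec_is_it_a_full_column (array : List Int) (out : Bool × Int) : Prop := out = is_it_a_full_column_alt array
instance (array : List Int) (out : Bool × Int) : Decidable (Spec_is_it_a_full_column array out) := by unfold Spec_is_it_a_full_column; infer_instance

-- ===== CLAIM (what is proved, stated in full; the proofs are below) =====
def Claim_equal_is_it_a_full_column : Prop := ∀ (array : List Int), Dom_is_it_a_full_column array → Spec_is_it_a_full_column array (is_it_a_full_column array)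

-- ===== LEMMAS AND PROOFS =====

-- characterisation predicates (proof helpers)
def pvNoOne (xs : List Int) : Bool := xs.all (fun x => decide (x ≠ 1))
def pvPrefRun (xs : List Int) : Bool := pvNoOne (xs.dropWhile (fun x => decide (x = 1)))
def pvOneRun (xs : List Int) : Bool := pvPrefRun (xs.dropWhile (fun x => decide (x ≠ 1)))

def pvSpecFun (xs : List Int) : Bool × Int :=
  if pvOneRun xs then (true, (xs.count 1 : Int)) else (false, 0)

theorem pvNoOne_cons_iff (x : Int) (xs : List Int) :
    pvNoOne (x :: xs) = true ↔ (¬x = 1 ∧ pvNoOne xs = true) := by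
  simp [pvNoOne, List.all_cons]

theorem pvGLDc (a d : Nat) (l : List Nat) : (a :: l).getLast?.getD d = l.getLast?.getD a := by
  cases l with
  | nil => simp
  | cons b t =>
    rw [List.getLast?_cons_cons]
    rcases hx : (b :: t).getLast? with _ | v
    · simp [List.getLast?_eq_none_iff] at hx
    · simp

theorem pvNoOne_count (xs : List Int) (h : pvNoOne xs = true) : xs.count 1 = 0 := by
  simp [pvNoOne, List.all_eq_true] at h
  simp [List.count_eq_zero]
  intro hm; exact h 1 hm rfl

theorem pvNoOne_dropWhile (p : Int → Bool) (xs : List Int) (h : pvNoOne xs = true) :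
    pvNoOne (xs.dropWhile p) = true := by
  simp [pvNoOne, List.all_eq_true] at *
  intro a ha; exact h a ((List.dropWhile_sublist _).subset ha)

theorem pvOneRun_of_noOne (xs : List Int) (h : pvNoOne xs = true) : pvOneRun xs = true := by
  exact pvNoOne_dropWhile _ _ (pvNoOne_dropWhile _ _ h)

theorem pvGoA_mode3 (xs : List Int) (c : Int) :
    pvGoA xs 1 1 c = if pvNoOne xs then (true, c) else (false, 0) := by
  induction xs generalizing c with
  | nil => simp [pvGoA, pvNoOne]
  | cons x xs ih =>
    by_cases h : x = 1 <;> simp [pvGoA, pvNoOne, h, ih, List.all_cons] <;> simp [pvNoOne] at ih <;> rw [ih]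

theorem pvGoA_mode2 (xs : List Int) (c : Int) :
    pvGoA xs 0 1 c = if pvPrefRun xs then (true, c + (xs.count 1 : Int)) else (false, 0) := by
  induction xs generalizing c with
  | nil => simp [pvGoA, pvPrefRun, pvNoOne]
  | cons x xs ih =>
    by_cases h : x = 1
    · subst h
      simp [pvGoA, ih, pvPrefRun, List.dropWhile_cons, List.count_cons]
      split_ifs <;> simp <;> ring
    · simp only [pvGoA, if_neg h, if_pos rfl]
      rw [pvGoA_mode3]
      have hpr : pvPrefRun (x :: xs) = pvNoOne (x :: xs) := by
        simp [pvPrefRun, List.dropWhile_cons, h]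
      rw [hpr]
      by_cases hn : pvNoOne xs = true
      · have hnc : pvNoOne (x :: xs) = true := (pvNoOne_cons_iff x xs).2 ⟨h, hn⟩
        simp [hn, hnc, List.count_cons, h, pvNoOne_count xs hn]
      · have hnc : ¬pvNoOne (x :: xs) = true := fun hc => hn ((pvNoOne_cons_iff x xs).1 hc).2
        simp [Bool.not_eq_true] at hn hnc
        simp [hn, hnc]

theorem pvGoA_mode1 (xs : List Int) :
    pvGoA xs 0 0 0 = pvSpecFun xs := by
  induction xs with
  | nil => simp [pvGoA, pvSpecFun, pvOneRun, pvPrefRun, pvNoOne]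
  | cons x xs ih =>
    by_cases h : x = 1
    · subst h
      simp [pvGoA, pvGoA_mode2, pvSpecFun, pvOneRun, pvPrefRun, List.dropWhile_cons, List.count_cons]
      split_ifs <;> simp <;> ring
    · simp [pvGoA, h, ih, pvSpecFun, pvOneRun, List.dropWhile_cons, List.count_cons]

-- shift lemma for the index list
theorem pvOnesIdxFrom_shift (xs : List Int) (i : Nat) :
    pvOnesIdxFrom i xs = (pvOnesIdxFrom 0 xs).map (· + i) := by
  induction xs generalizing i with
  | nil => simp [pvOnesIdxFrom]
  | cons x xs ih =>
    by_cases h : x = 1 <;>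
      simp [pvOnesIdxFrom, h, ih (i + 1), ih 1, List.map_map, Function.comp] <;>
      all_goals (intros; omega)

theorem pvGetLastD_map_add (t : List Nat) (h k : Nat) :
    (t.map (fun x => x + k)).getLast?.getD (h + k) = t.getLast?.getD h + k := by
  rw [List.getLast?_map]
  cases t.getLast? <;> simp

theorem pvOnesIdxFrom_nil_iff (xs : List Int) :
    pvOnesIdxFrom 0 xs = [] ↔ pvNoOne xs = true := by
  induction xs with
  | nil => simp [pvOnesIdxFrom, pvNoOne]
  | cons x xs ih =>
    by_cases h : x = 1
    · subst h; simp [pvOnesIdxFrom, pvNoOne]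
    · simp [pvOnesIdxFrom, h, pvOnesIdxFrom_shift xs 1, pvNoOne, List.all_cons]
      simpa [pvNoOne] using ih

theorem pvOnesIdxFrom_length (xs : List Int) :
    (pvOnesIdxFrom 0 xs).length = xs.count 1 := by
  induction xs with
  | nil => simp [pvOnesIdxFrom]
  | cons x xs ih =>
    by_cases h : x = 1 <;>
      simp [pvOnesIdxFrom, h, pvOnesIdxFrom_shift xs 1, List.count_cons, ih]

-- the last listed index is at least count - 1
theorem pvLast_ge (xs : List Int) (h : Nat) (t : List Nat)
    (he : pvOnesIdxFrom 0 xs = h :: t) : xs.count 1 ≤ t.getLast?.getD h + 1 := by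
  induction xs generalizing h t with
  | nil => simp [pvOnesIdxFrom] at he
  | cons x xs ih =>
    by_cases hx : x = 1
    · subst hx
      simp [pvOnesIdxFrom, pvOnesIdxFrom_shift xs 1] at he
      obtain ⟨rfl, rfl⟩ := he
      rcases hh : pvOnesIdxFrom 0 xs with _ | ⟨h₂, t₂⟩
      · have hc : xs.count 1 = 0 := by rw [← pvOnesIdxFrom_length, hh]; rfl
        simp [hh, List.count_cons, hc]
      · have := ih h₂ t₂ hh
        have hmap := pvGetLastD_map_add t₂ h₂ 1
        have hcons := pvGLDc (h₂ + 1) 0 (t₂.map (fun x => x + 1))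
        simp [hh, List.count_cons]
        omega
    · simp [pvOnesIdxFrom, hx, pvOnesIdxFrom_shift xs 1] at he
      rcases hh : pvOnesIdxFrom 0 xs with _ | ⟨h₂, t₂⟩
      · simp [hh] at he
      · simp [hh] at he
        obtain ⟨rfl, rfl⟩ := he
        have := ih h₂ t₂ hh
        have hmap := pvGetLastD_map_add t₂ h₂ 1
        simp [List.count_cons, hx]
        omega

-- prefix-run characterisation: the ones form a prefix iff last index + 1 = count
theorem pvPref_char (xs : List Int) (h : Nat) (t : List Nat)
    (he : pvOnesIdxFrom 0 xs = h :: t) :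
    (pvPrefRun xs = true ↔ t.getLast?.getD h + 1 = xs.count 1) := by
  induction xs generalizing h t with
  | nil => simp [pvOnesIdxFrom] at he
  | cons x xs ih =>
    by_cases hx : x = 1
    · subst hx
      simp [pvOnesIdxFrom, pvOnesIdxFrom_shift xs 1] at he
      obtain ⟨rfl, rfl⟩ := he
      have hpr : pvPrefRun (1 :: xs) = pvPrefRun xs := by
        simp [pvPrefRun, List.dropWhile_cons]
      rcases hh : pvOnesIdxFrom 0 xs with _ | ⟨h₂, t₂⟩
      · have hc : xs.count 1 = 0 := by rw [← pvOnesIdxFrom_length, hh]; rfl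
        have hno := (pvOnesIdxFrom_nil_iff xs).1 hh
        have hpx : pvPrefRun xs = true := pvNoOne_dropWhile _ _ hno
        simp [hh, hpr, hpx, List.count_cons, hc]
      · have hiff := ih h₂ t₂ hh
        have hmap := pvGetLastD_map_add t₂ h₂ 1
        have hcons := pvGLDc (h₂ + 1) 0 (t₂.map (fun x => x + 1))
        simp [hh, hpr, hiff, List.count_cons]
        omega
    · simp [pvOnesIdxFrom, hx, pvOnesIdxFrom_shift xs 1] at he
      rcases hh : pvOnesIdxFrom 0 xs with _ | ⟨h₂, t₂⟩
      · simp [hh] at he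
      · simp [hh] at he
        obtain ⟨rfl, rfl⟩ := he
        have hge := pvLast_ge xs h₂ t₂ hh
        have hmem : (1 : Int) ∈ xs := by
          by_contra hmem
          have hno : pvNoOne xs = true := by
            simp [pvNoOne, List.all_eq_true]
            intro a ha hq; exact hmem (hq ▸ ha)
          rw [(pvOnesIdxFrom_nil_iff xs).2 hno] at hh; simp at hh
        have hpr : ¬ pvPrefRun (x :: xs) = true := by
          simp [pvPrefRun, List.dropWhile_cons, hx, pvNoOne, List.all_eq_true]
          exact hmem
        have hmap := pvGetLastD_map_add t₂ h₂ 1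
        simp [Bool.not_eq_true] at hpr
        simp [hpr, List.count_cons, hx]
        omega

-- one-run characterisation: span = count iff the ones form one contiguous run
theorem pvRun_char (xs : List Int) (h : Nat) (t : List Nat)
    (he : pvOnesIdxFrom 0 xs = h :: t) :
    (pvOneRun xs = true ↔ t.getLast?.getD h - h + 1 = (h :: t).length) := by
  induction xs generalizing h t with
  | nil => simp [pvOnesIdxFrom] at he
  | cons x xs ih =>
    by_cases hx : x = 1
    · subst hx
      simp [pvOnesIdxFrom, pvOnesIdxFrom_shift xs 1] at he
      obtain ⟨rfl, rfl⟩ := he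
      have hor : pvOneRun (1 :: xs) = pvPrefRun xs := by
        simp [pvOneRun, pvPrefRun, List.dropWhile_cons]
      rcases hh : pvOnesIdxFrom 0 xs with _ | ⟨h₂, t₂⟩
      · have hno := (pvOnesIdxFrom_nil_iff xs).1 hh
        have hpx : pvPrefRun xs = true := pvNoOne_dropWhile _ _ hno
        simp [hh, hor, hpx]
      · have hpc := pvPref_char xs h₂ t₂ hh
        have hlen : (h₂ :: t₂).length = xs.count 1 := by
          rw [← pvOnesIdxFrom_length, hh]
        have hmap := pvGetLastD_map_add t₂ h₂ 1
        have hcons := pvGLDc (h₂ + 1) 0 (t₂.map (fun x => x + 1))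
        have hge := pvLast_ge xs h₂ t₂ hh
        simp [hh, hor, hpc]
        simp at hlen
        omega
    · simp [pvOnesIdxFrom, hx, pvOnesIdxFrom_shift xs 1] at he
      rcases hh : pvOnesIdxFrom 0 xs with _ | ⟨h₂, t₂⟩
      · simp [hh] at he
      · simp [hh] at he
        obtain ⟨rfl, rfl⟩ := he
        have hiff := ih h₂ t₂ hh
        have hor : pvOneRun (x :: xs) = pvOneRun xs := by
          simp [pvOneRun, List.dropWhile_cons, hx]
        have hmap := pvGetLastD_map_add t₂ h₂ 1
        simp [hor, hiff]

theorem pvAlt_eq_spec (xs : List Int) : is_it_a_full_column_alt xs = pvSpecFun xs := by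
  unfold is_it_a_full_column_alt
  rcases hh : pvOnesIdxFrom 0 xs with _ | ⟨h, t⟩
  · have hno := (pvOnesIdxFrom_nil_iff xs).1 hh
    have hc : xs.count 1 = 0 := by rw [← pvOnesIdxFrom_length, hh]; rfl
    simp [pvSpecFun, pvOneRun_of_noOne xs hno, hc]
  · have hch := pvRun_char xs h t hh
    have hlen : (h :: t).length = xs.count 1 := by
      rw [← pvOnesIdxFrom_length, hh]
    by_cases hr : pvOneRun xs = true
    · have := hch.1 hr
      simp [pvSpecFun, hr, hlen] at this ⊢
      omega
    · have hns : ¬(t.getLast?.getD h - h + 1 = (h :: t).length) := fun hc => hr (hch.2 hc)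
      simp [Bool.not_eq_true] at hr
      simp [pvSpecFun, hr] at hns ⊢
      omega

-- ===== VERDICT (by name: the statement is the Claim_ definition above) =====
theorem is_it_a_full_column_spec : Claim_equal_is_it_a_full_column := by
  intro array _
  show is_it_a_full_column array = is_it_a_full_column_alt array
  rw [pvAlt_eq_spec, is_it_a_full_column, pvGoA_mode1]
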